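-- pv_equiv track=rewrite | github.com/CDSchuster/ReverseLigQ_2 | db_generation/generate_dataset.py | bemis_murcko_clustering
-- ===== SOURCE A (Python) =====
-- def bemis_murcko_clustering(smiles, scaffolds):
--     """Cluster ligands by Murcko scaffolds, returning one representative per scaffold.
--
--     Parameters
--     ----------
--     smiles : list
--         List of SMILES strings representing the ligands to be clustered.
--     scaffolds : dict
--         Dictionary where keys are SMILES strings and values are their
--         corresponding Murcko scaffold SMILES.
--
--     Returns
--     -------
--     clustered_ids : list
--         List of SMILES strings, each one being a representative ligand for a
--         unique scaffold.
--     """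
--
--     scaffold_dict = {}
--     for smile in smiles:
--         scaffold_smiles = scaffolds[smile]
--         if scaffold_smiles not in scaffold_dict:
--             scaffold_dict[scaffold_smiles] = []
--         scaffold_dict[scaffold_smiles].append(smile)
--
--     clustered_ids = [ligands[0] for ligands in scaffold_dict.values()]
--     return clustered_ids
-- ===== SOURCE B (Python) =====
-- def bemis_murcko_clustering(smiles, scaffolds):
--     """Worklist elimination: take the first remaining ligand as a representative,
--     then discard every remaining ligand sharing its scaffold, and repeat."""
--     result = []
--     rest = list(smiles)
--     while rest:
--         head = rest[0]
--         result.append(head)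
--         key = scaffolds[head]
--         rest = [s for s in rest[1:] if scaffolds[s] != key]
--     return result
-- ===== Notes on version B (the rewrite author's own statement) =====
-- stated objective: alternative
-- what changed: Replaces A's single-pass dict-of-lists grouping followed by a head projection with a worklist-elimination loop: repeatedly take the first remaining ligand as the representative and filter out every remaining ligand with the same scaffold.
import Mathlib
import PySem

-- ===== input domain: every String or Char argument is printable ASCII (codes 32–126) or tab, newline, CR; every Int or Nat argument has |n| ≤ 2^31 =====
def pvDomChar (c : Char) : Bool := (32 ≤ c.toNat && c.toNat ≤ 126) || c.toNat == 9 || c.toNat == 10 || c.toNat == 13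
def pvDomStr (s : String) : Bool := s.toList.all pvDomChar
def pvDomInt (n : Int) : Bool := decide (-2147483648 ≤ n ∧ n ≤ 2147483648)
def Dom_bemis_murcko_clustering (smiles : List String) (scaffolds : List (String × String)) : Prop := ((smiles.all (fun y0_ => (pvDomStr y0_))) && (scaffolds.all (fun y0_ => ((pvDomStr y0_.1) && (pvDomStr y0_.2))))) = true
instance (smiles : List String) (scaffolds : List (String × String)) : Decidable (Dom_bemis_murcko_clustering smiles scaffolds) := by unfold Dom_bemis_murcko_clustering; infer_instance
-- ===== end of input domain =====

-- B replaces A's dict-of-lists grouping + head projection by worklist elimination: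
-- repeatedly take the first remaining ligand and filter out same-scaffold remainders (objective: alternative).

-- ===== PORT A =====
-- scaffolds[smile] is ported as getD with default ""; Pre_ guarantees the key is present,
-- exactly where Python's A returns without a KeyError.
def bemis_murcko_clustering (smiles : List String) (scaffolds : List (String × String)) : List String :=
  let sc := PySem.Dict.ofList scaffolds
  let scaffold_dict : PySem.Dict String (List String) :=
    smiles.foldl (fun d smile =>
      let scaffold_smiles := sc.getD smile ""
      let d := if d.contains scaffold_smiles then d else d.insert scaffold_smiles []
      d.modify scaffold_smiles [] (fun l => l ++ [smile])) PySem.Dict.empty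
  scaffold_dict.values.map (fun ligands => PySem.List.pyGetD ligands 0 "")

-- ===== PORT B =====
-- the while-loop of Source B: state (result, rest); each round appends rest's head and
-- filters the tail by scaffold inequality.
def pvWorklist (sc : PySem.Dict String String) (result : List String) (rest : List String) : List String :=
  match rest with
  | [] => result
  | head :: t =>
      pvWorklist sc (result ++ [head]) (t.filter (fun s => !(sc.getD s "" == sc.getD head "")))
termination_by rest.length
decreasing_by
  simp only [List.length_cons, List.length_unattach]
  exact Nat.lt_succ_of_le (le_trans (List.length_filter_le _ _) (by simp))

def bemis_murcko_clustering_alt (smiles : List String) (scaffolds : List (String × String)) : List String :=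
  pvWorklist (PySem.Dict.ofList scaffolds) [] smiles

-- ===== PRECONDITION & SPEC =====
-- Pre_ excludes exactly the inputs where some smile is not a key of scaffolds, on which Python's A raises KeyError.
def Pre_bemis_murcko_clustering (smiles : List String) (scaffolds : List (String × String)) : Prop :=
  smiles.all (fun s => (PySem.Dict.ofList scaffolds).contains s) = true
instance (smiles : List String) (scaffolds : List (String × String)) : Decidable (Pre_bemis_murcko_clustering smiles scaffolds) := by unfold Pre_bemis_murcko_clustering; infer_instance

def pvWitness_bemis_murcko_clustering : List String × (List (String × String)) :=
  (["CCO", "CCN", "c1ccccc1O"], [("CCO", ""), ("CCN", ""), ("c1ccccc1O", "c1ccccc1")])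

def Spec_bemis_murcko_clustering (smiles : List String) (scaffolds : List (String × String)) (out : List String) : Prop := out = bemis_murcko_clustering_alt smiles scaffolds
instance (smiles : List String) (scaffolds : List (String × String)) (out : List String) : Decidable (Spec_bemis_murcko_clustering smiles scaffolds out) := by unfold Spec_bemis_murcko_clustering; infer_instance

-- ===== CLAIM (what is proved, stated in full; the proofs are below) =====
def Claim_equal_bemis_murcko_clustering : Prop := ∀ (smiles : List String) (scaffolds : List (String × String)), Dom_bemis_murcko_clustering smiles scaffolds → Pre_bemis_murcko_clustering smiles scaffolds → Spec_bemis_murcko_clustering smiles scaffolds (bemis_murcko_clustering smiles scaffolds)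

-- ===== LEMMAS AND PROOFS =====

theorem modify_eq_insert {ν : Type} (d : PySem.Dict String ν) (k : String) (dflt : ν) (f : ν → ν) :
    d.modify k dflt f = d.insert k (f (d.getD k dflt)) := rfl

-- A's loop body equals one 'modify' step (the explicit "create empty list first" branch folds away).
theorem stepA_eq_modify (d : PySem.Dict String (List String)) (k : String) (x : String) :
    ((if d.contains k then d else d.insert k []).modify k [] (fun l => l ++ [x]))
      = d.modify k [] (fun l => l ++ [x]) := by
  by_cases h : d.contains k = true
  · simp [h]
  · have h' : d.contains k = false := by simpa using h
    have hg : d.getD k [] = [] := PySem.Dict.getD_of_not_contains _ _ h'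
    simp [h, modify_eq_insert, PySem.Dict.insert_insert_self, PySem.Dict.getD_insert_self, hg]

-- Bridge 1: A's dict loop mirrors a seen-set fold.
theorem loop_inv (sc : PySem.Dict String String) :
    ∀ (l : List String) (d : PySem.Dict String (List String)) (seen : PySem.Set String) (res : List String),
    seen = d.keys →
    res = d.values.map (fun lg => PySem.List.pyGetD lg 0 "") →
    d.keys.Nodup →
    (∀ c, d.contains c = true → d.getD c [] ≠ []) →
    (l.foldl (fun d smile =>
        let k := sc.getD smile ""
        let d := if d.contains k then d else d.insert k []
        d.modify k [] (fun lg => lg ++ [smile])) d).values.map (fun lg => PySem.List.pyGetD lg 0 "")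
      = (l.foldl (fun (st : PySem.Set String × List String) smile =>
          let k := sc.getD smile ""
          if PySem.Set.contains st.1 k then st
          else (PySem.Set.add st.1 k, st.2 ++ [smile])) (seen, res)).2 := by
  intro l
  induction l with
  | nil => intro d seen res hseen hres _ _; simpa using hres.symm
  | cons x rest ih =>
    intro d seen res hseen hres hnd hne
    simp only [List.foldl_cons]
    rw [stepA_eq_modify]
    rw [modify_eq_insert]
    set k := sc.getD x "" with hk
    by_cases h : d.contains k = true
    · -- seen scaffold: B's state unchanged, A's values keep their heads
      have hmem : k ∈ d.keys := (PySem.Dict.contains_iff_mem_keys _ _).1 h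
      have hseenc : PySem.Set.contains seen k = true := by
        subst hseen; simpa [PySem.Set.contains] using hmem
      rw [if_pos hseenc]
      have hkeys : (d.insert k (d.getD k [] ++ [x])).keys = d.keys :=
        PySem.Dict.keys_insert_of_contains _ _ h
      apply ih _ _ _ (hseen.trans hkeys.symm) ?_ (by rw [hkeys]; exact hnd) ?_
      · rw [PySem.Dict.values_eq_map_keys _ (by rw [hkeys]; exact hnd) ([] : List String), hkeys]
        rw [hres, PySem.Dict.values_eq_map_keys _ hnd ([] : List String)]
        simp only [List.map_map]
        apply List.map_congr_left
        intro c hc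
        by_cases hck : c = k
        · rw [hck]
          simp only [Function.comp, PySem.Dict.getD_insert_self, PySem.List.pyGetD_zero]
          have hne' := hne k h
          cases hd : d.getD k [] with
          | nil => exact absurd hd hne'
          | cons a t => simp
        · have hgc : (d.insert k (d.getD k [] ++ [x])).getD c [] = d.getD c [] := by
            rw [PySem.Dict.getD_insert]; simp [hck]
          simp [Function.comp, hgc]
      · intro c hc
        rw [PySem.Dict.getD_insert]
        by_cases hck : c = k
        · simp [hck]
        · simp only [if_neg hck]
          refine hne c ?_
          simpa [PySem.Dict.contains_insert, hck] using hc
    · -- new scaffold: both sides append a representative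
      have h' : d.contains k = false := by simpa using h
      have hnmem : k ∉ d.keys := fun hm => by
        simp [(PySem.Dict.contains_iff_mem_keys _ _).2 hm] at h
      have hseenc : PySem.Set.contains seen k = false := by
        subst hseen; simpa [PySem.Set.contains] using hnmem
      have hseenm : k ∉ seen := hseen ▸ hnmem
      rw [if_neg (by simp [hseenm])]
      have hg : d.getD k [] = [] := PySem.Dict.getD_of_not_contains _ _ h'
      rw [hg]
      have hkeys : (d.insert k ([] ++ [x])).keys = d.keys ++ [k] :=
        PySem.Dict.keys_insert_of_not_contains _ _ h'
      have hnd' : (d.insert k ([] ++ [x])).keys.Nodup := by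
        rw [hkeys]
        simp only [List.nodup_append, List.nodup_singleton, true_and]
        refine ⟨hnd, ?_⟩
        intro a ha b hb
        simp only [List.mem_singleton] at hb
        subst hb
        exact fun hak => hnmem (hak ▸ ha)
      apply ih _ _ _ ?_ ?_ hnd' ?_
      · rw [hkeys, hseen]
        simp [PySem.Set.add, PySem.Set.contains, hnmem]
      · rw [PySem.Dict.values_eq_map_keys _ hnd' ([] : List String), hkeys]
        rw [hres, PySem.Dict.values_eq_map_keys _ hnd ([] : List String)]
        simp only [List.map_append, List.map_map, List.map_cons, List.map_nil]
        congr 1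
        · apply List.map_congr_left
          intro c hc
          have hck : c ≠ k := fun hck => hnmem (hck ▸ hc)
          simp [Function.comp, PySem.Dict.getD_insert, hck]
        · simp [PySem.Dict.getD_insert_self, PySem.List.pyGetD_zero]
      · intro c hc
        rw [PySem.Dict.getD_insert]
        by_cases hck : c = k
        · simp [hck]
        · simp only [if_neg hck]
          refine hne c ?_
          simpa [PySem.Dict.contains_insert, hck] using hc

-- Bridge 2: the seen-set fold over l computes B's worklist loop on the filtered remainder.
theorem fold_eq_worklist (sc : PySem.Dict String String) :
    ∀ (l : List String) (seen : PySem.Set String) (res : List String),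
    (l.foldl (fun (st : PySem.Set String × List String) smile =>
        let k := sc.getD smile ""
        if PySem.Set.contains st.1 k then st
        else (PySem.Set.add st.1 k, st.2 ++ [smile])) (seen, res)).2
      = pvWorklist sc res (l.filter (fun s => !(PySem.Set.contains seen (sc.getD s "")))) := by
  intro l
  induction l with
  | nil => intro seen res; simp [pvWorklist]
  | cons x r ih =>
    intro seen res
    simp only [List.foldl_cons, List.filter_cons]
    by_cases h : PySem.Set.contains seen (sc.getD x "") = true
    · rw [if_pos h]
      have hm : sc.getD x "" ∈ seen := by simpa using h
      rw [if_neg (by simp [hm])]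
      exact ih seen res
    · have h' : PySem.Set.contains seen (sc.getD x "") = false := by simpa using h
      rw [if_neg h]
      have hm : sc.getD x "" ∉ seen := by simpa using h'
      rw [if_pos (by simp [hm])]
      rw [ih]
      conv_rhs => rw [pvWorklist]
      congr 1
      rw [List.filter_filter]
      apply List.filter_congr
      intro s _
      have hadd : PySem.Set.contains (PySem.Set.add seen (sc.getD x "")) (sc.getD s "")
          = (PySem.Set.contains seen (sc.getD s "") || (sc.getD s "" == sc.getD x "")) := by
        by_cases h1 : sc.getD s "" ∈ seen <;> by_cases h2 : sc.getD s "" = sc.getD x "" <;>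
          simp [PySem.Set.mem_add, h1, h2]
      rw [hadd]
      cases hc : PySem.Set.contains seen (sc.getD s "") <;>
        cases he : (sc.getD s "" == sc.getD x "") <;> simp

-- ===== VERDICT (by name: the statement is the Claim_ definition above) =====
theorem bemis_murcko_clustering_spec : Claim_equal_bemis_murcko_clustering := by
  intro smiles scaffolds _ _
  unfold Spec_bemis_murcko_clustering bemis_murcko_clustering bemis_murcko_clustering_alt
  rw [loop_inv (PySem.Dict.ofList scaffolds) smiles PySem.Dict.empty PySem.Set.empty []
    (by rfl) (by rfl) (by simp [PySem.Dict.keys_empty]) (by intro c hc; simp [PySem.Dict.contains_empty] at hc)]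
  rw [fold_eq_worklist]
  congr 1
  apply List.filter_eq_self.2
  intro s _
  simp [PySem.Set.contains, PySem.Set.empty]
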